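-- pv_equiv track=rewrite | github.com/satish6288/python-programs | nest.py | process_requests
-- ===== SOURCE A (Python) =====
-- def process_requests(request_list):
--     keys = ['repo', 'package', 'version']
--     res = []
--
--     # Temporary variable to hold partial entries
--     temp_parts = []
--
--     for entry in request_list:
--         if not entry or entry == "######":
--             continue
--         parts = entry.split()
--         temp_parts.extend(parts)
--
--         # If we have enough parts to form a complete dictionary
--         while len(temp_parts) >= 3:
--             sub_dict = {keys[i]: temp_parts[i] for i in range(3)}
--             res.append(sub_dict)
--             temp_parts = temp_parts[3:]  # Remove processed parts
--
--     return res
-- ===== SOURCE B (Python) =====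
-- def process_requests(request_list):
--     keys = ['repo', 'package', 'version']
--     tokens = []
--     for entry in request_list:
--         if entry and entry != "######":
--             tokens.extend(entry.split())
--     it = iter(tokens)
--     return [dict(zip(keys, t)) for t in zip(it, it, it)]
-- ===== Notes on version B (the rewrite author's own statement) =====
-- stated objective: idiomatic
-- what changed: B flattens all tokens in one pass and then groups them into consecutive triples with the iter/zip idiom, instead of A's interleaved while-loop that repeatedly slices a running buffer inside the outer loop.
import Mathlib
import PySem

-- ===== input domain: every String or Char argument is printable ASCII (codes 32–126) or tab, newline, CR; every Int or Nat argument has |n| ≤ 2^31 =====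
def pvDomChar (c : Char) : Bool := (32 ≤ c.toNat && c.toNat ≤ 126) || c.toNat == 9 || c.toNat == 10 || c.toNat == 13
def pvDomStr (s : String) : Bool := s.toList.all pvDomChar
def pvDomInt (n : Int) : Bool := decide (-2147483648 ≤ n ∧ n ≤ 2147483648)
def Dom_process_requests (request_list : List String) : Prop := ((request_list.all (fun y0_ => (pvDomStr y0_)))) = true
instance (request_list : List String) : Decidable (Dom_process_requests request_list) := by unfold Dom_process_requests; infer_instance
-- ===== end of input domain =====

-- B flattens all tokens in one pass and then groups them into consecutive triples,
-- instead of A's interleaved while-loop over a running buffer (objective: idiomatic).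

-- ===== PORT A =====
-- the 'while len(temp_parts) >= 3' loop: emit {'repo':…,'package':…,'version':…}, temp_parts = temp_parts[3:]
def pvDrainA (res : List (List (String × String))) (temp : List String) :
    List (List (String × String)) × List String :=
  match temp with
  | a :: b :: c :: rest => pvDrainA (res ++ [[("repo", a), ("package", b), ("version", c)]]) rest
  | _ => (res, temp)

def process_requests (request_list : List String) : List (List (String × String)) :=
  (request_list.foldl
    (fun (st : List (List (String × String)) × List String) entry =>
      if entry = "" ∨ entry = "######" then st
      else pvDrainA st.1 (st.2 ++ PySem.Str.split₀ entry))
    ([], [])).1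

-- ===== PORT B =====
-- zip(it, it, it) over the flat token list: consecutive triples, trailing <3 tokens dropped
def pvChunk3 : List String → List (List (String × String))
  | a :: b :: c :: rest => [("repo", a), ("package", b), ("version", c)] :: pvChunk3 rest
  | _ => []

def process_requests_alt (request_list : List String) : List (List (String × String)) :=
  let tokens := request_list.foldl
    (fun acc entry =>
      if entry ≠ "" ∧ entry ≠ "######" then acc ++ PySem.Str.split₀ entry else acc) []
  pvChunk3 tokens

-- ===== PRECONDITION & SPEC =====
def Spec_process_requests (request_list : List String) (out : List (List (String × String))) : Prop := out = process_requests_alt request_list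
instance (request_list : List String) (out : List (List (String × String))) : Decidable (Spec_process_requests request_list out) := by unfold Spec_process_requests; infer_instance

-- ===== CLAIM (what is proved, stated in full; the proofs are below) =====
def Claim_equal_process_requests : Prop := ∀ (request_list : List String), Dom_process_requests request_list → Spec_process_requests request_list (process_requests request_list)

-- ===== LEMMAS AND PROOFS =====

-- the leftover buffer after draining
def pvRem3 : List String → List String
  | _ :: _ :: _ :: rest => pvRem3 rest
  | xs => xs

theorem pvDrainA_eq (res : List (List (String × String))) (temp : List String) :
    pvDrainA res temp = (res ++ pvChunk3 temp, pvRem3 temp) := by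
  fun_induction pvDrainA res temp with
  | case1 res a b c rest ih => simp [pvChunk3, pvRem3, ih]
  | case2 x y h => cases x with
    | nil => simp [pvChunk3, pvRem3]
    | cons a t => cases t with
      | nil => simp [pvChunk3, pvRem3]
      | cons b t2 => cases t2 with
        | nil => simp [pvChunk3, pvRem3]
        | cons c t3 => exact absurd rfl (h a b c t3)

theorem pvChunk3_append (xs ys : List String) :
    pvChunk3 (xs ++ ys) = pvChunk3 xs ++ pvChunk3 (pvRem3 xs ++ ys) ∧
    pvRem3 (xs ++ ys) = pvRem3 (pvRem3 xs ++ ys) := by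
  fun_induction pvChunk3 xs with
  | case1 a b c rest ih => simpa [pvChunk3, pvRem3] using ih
  | case2 y h => cases y with
    | nil => simp [pvRem3]
    | cons a t => cases t with
      | nil => simp [pvRem3]
      | cons b t2 => cases t2 with
        | nil => simp [pvRem3]
        | cons c t3 => exact absurd rfl (h a b c t3)

theorem pvRem3_short (xs : List String) : (pvRem3 xs).length < 3 := by
  fun_induction pvRem3 xs with
  | case1 a b c rest ih => exact ih
  | case2 y h =>
    cases y with
    | nil => simp
    | cons a t => cases t with
      | nil => simp
      | cons b t2 => cases t2 with
        | nil => simp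
        | cons c t3 => exact absurd rfl (h a b c t3)

theorem pvChunk3_short (xs : List String) (h : xs.length < 3) : pvChunk3 xs = [] := by
  cases xs with
  | nil => rfl
  | cons a t => cases t with
    | nil => rfl
    | cons b t2 => cases t2 with
      | nil => rfl
      | cons c t3 => simp at h; omega

theorem pvFlatB_acc (l : List String) (acc : List String) :
    l.foldl (fun acc entry => if entry ≠ "" ∧ entry ≠ "######" then acc ++ PySem.Str.split₀ entry else acc) acc
    = acc ++ l.foldl (fun acc entry => if entry ≠ "" ∧ entry ≠ "######" then acc ++ PySem.Str.split₀ entry else acc) [] := by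
  induction l generalizing acc with
  | nil => simp
  | cons e l ih =>
    simp only [List.foldl_cons]
    by_cases h : e ≠ "" ∧ e ≠ "######"
    · simp only [if_pos h, List.nil_append]
      rw [ih, ih (PySem.Str.split₀ e)]
      simp
    · simp only [if_neg h]
      exact ih acc

theorem pv_main (l : List String) (res : List (List (String × String))) (temp : List String)
    (ht : temp.length < 3) :
    (l.foldl
      (fun (st : List (List (String × String)) × List String) entry =>
        if entry = "" ∨ entry = "######" then st
        else pvDrainA st.1 (st.2 ++ PySem.Str.split₀ entry))
      (res, temp)).1
    = res ++ pvChunk3 (temp ++ l.foldl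
        (fun acc entry =>
          if entry ≠ "" ∧ entry ≠ "######" then acc ++ PySem.Str.split₀ entry else acc) []) := by
  induction l generalizing res temp with
  | nil => simp [pvChunk3_short temp ht]
  | cons e l ih =>
    simp only [List.foldl_cons]
    by_cases h1 : e = "" ∨ e = "######"
    · have h2 : ¬ (e ≠ "" ∧ e ≠ "######") := by tauto
      simp only [if_pos h1, if_neg h2, ih res temp ht]
    · have h2 : e ≠ "" ∧ e ≠ "######" := by tauto
      rw [if_neg h1, if_pos h2, pvDrainA_eq,
        ih _ _ (pvRem3_short (temp ++ PySem.Str.split₀ e))]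
      simp only [List.nil_append]
      rw [pvFlatB_acc l (PySem.Str.split₀ e)]
      have h3 := pvChunk3_append (temp ++ PySem.Str.split₀ e)
        (l.foldl (fun acc entry => if entry ≠ "" ∧ entry ≠ "######" then acc ++ PySem.Str.split₀ entry else acc) [])
      rw [← List.append_assoc temp, h3.1]
      simp

-- ===== VERDICT (by name: the statement is the Claim_ definition above) =====
theorem process_requests_spec : Claim_equal_process_requests := by
  intro l _
  unfold Spec_process_requests process_requests process_requests_alt
  simpa using pv_main l [] []
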